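-- pv_equiv track=rewrite | github.com/molsonkiko/dframe | binarySearch.py | alnumToInt
-- ===== SOURCE A (Python) =====
-- def alnumToInt(string):
-- 	'''string: a string OF LENGTH 15 OR LESS
-- CONTAINING ONLY UPPER AND LOWER CASE ASCII CHARS, DIGITS, AND ' '.
-- Returns: A number, such that numbers and words are sorted in the same way they
-- 	would be in a dictionary.
-- 	Well, almost. 'z'*15 has a greater value than ' ', even though it's lexicographically earlier.
-- 	There are probably other deviations of this nature too. For the most part the lexicographic ordering
-- 	seems to be correct.
-- If the string is empty or contains non-conforming chars, returns None.'''
-- 	if len(string)==0 or len(string)>15: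
-- 		return None
-- 	chars='0123456789ABCDEFGHIJKLMNOPQRSTUVWXYZabcdefghijklmnopqrstuvwxyz '
-- 	out=0
-- 	L=len(string)
-- 	for i in range(L):
-- 		if string[i] not in chars:
-- 			return None
-- 		out+=(1+chars.index(string[i]))*53**(16-i-1)
-- 	return out
-- ===== SOURCE B (Python) =====
-- def alnumToInt(string):
--     L = len(string)
--     if not (0 < L <= 15):
--         return None
--     chars = '0123456789ABCDEFGHIJKLMNOPQRSTUVWXYZabcdefghijklmnopqrstuvwxyz '
--     rank = {c: i + 1 for i, c in enumerate(chars)}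
--     acc = 0
--     for c in string:
--         r = rank.get(c)
--         if r is None:
--             return None
--         acc = acc * 53 + r
--     return acc * 53 ** (16 - L)
-- ===== Notes on version B (the rewrite author's own statement) =====
-- stated objective: alternative
-- what changed: Replaces per-position explicit powers 53**(15-i) summed with repeated chars.index scans by a precomputed rank dict and a Horner multiply-add accumulator, scaled once at the end by 53**(16-L).
import Mathlib
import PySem

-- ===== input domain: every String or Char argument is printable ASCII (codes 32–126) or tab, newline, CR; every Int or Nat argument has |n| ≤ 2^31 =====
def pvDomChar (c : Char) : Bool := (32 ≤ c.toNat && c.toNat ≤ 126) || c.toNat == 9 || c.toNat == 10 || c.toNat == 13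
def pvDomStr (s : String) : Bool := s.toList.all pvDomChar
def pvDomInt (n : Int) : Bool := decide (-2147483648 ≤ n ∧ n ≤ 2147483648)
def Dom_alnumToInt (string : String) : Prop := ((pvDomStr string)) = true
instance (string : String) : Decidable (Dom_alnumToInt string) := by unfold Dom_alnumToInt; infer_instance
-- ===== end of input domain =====

set_option maxRecDepth 8192


-- B replaces A's per-position explicit powers and repeated chars.index scans by a precomputed
-- rank dictionary and a Horner multiply-add accumulator with one closing scale factor (alternative).

-- ===== PORT A =====
-- the allowed alphabet, shared literal of both Pythons
def pvChars : List Char := "0123456789ABCDEFGHIJKLMNOPQRSTUVWXYZabcdefghijklmnopqrstuvwxyz ".toList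

-- A's 'for i in range(L)' loop: current index i, accumulator out; early return None on a bad char
def pvLoopA : List Char → Nat → Int → Option Int
  | [], _, out => some out
  | c :: rest, i, out =>
    if c ∈ pvChars then
      pvLoopA rest (i + 1) (out + (1 + (((PySem.List.index? pvChars c).getD 0 : Nat) : Int)) * 53 ^ (16 - i - 1))
    else none

def alnumToInt (string : String) : Option Int :=
  let s := string.toList
  if s.length = 0 ∨ s.length > 15 then none
  else pvLoopA s 0 0

-- ===== PORT B =====
-- rank = {c: i+1 for i, c in enumerate(chars)}
def pvRank : PySem.Dict Char Int :=
  (PySem.List.enumerate pvChars 0).foldl (fun d p => d.insert p.2 (p.1 + 1)) PySem.Dict.empty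

-- B's Horner loop: acc = acc*53 + rank[c], None if c has no rank
def pvLoopB : List Char → Int → Option Int
  | [], acc => some acc
  | c :: rest, acc =>
    match pvRank.get? c with
    | none => none
    | some r => pvLoopB rest (acc * 53 + r)

def alnumToInt_alt (string : String) : Option Int :=
  let s := string.toList
  if 0 < s.length ∧ s.length ≤ 15 then
    (pvLoopB s 0).map (fun acc => acc * 53 ^ (16 - s.length))
  else none

-- ===== PRECONDITION & SPEC =====
def Spec_alnumToInt (string : String) (out : Option Int) : Prop := out = alnumToInt_alt string
instance (string : String) (out : Option Int) : Decidable (Spec_alnumToInt string out) := by unfold Spec_alnumToInt; infer_instance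

-- ===== CLAIM (what is proved, stated in full; the proofs are below) =====
def Claim_equal_alnumToInt : Prop := ∀ (string : String), Dom_alnumToInt string → Spec_alnumToInt string (alnumToInt string)

-- ===== LEMMAS AND PROOFS =====

theorem pvRank_items :
    pvRank.items = (PySem.List.enumerate pvChars 0).map (fun p => (p.2, p.1 + 1)) := by
  have h := PySem.Dict.items_foldl_insert_fresh
    (l := PySem.List.enumerate pvChars 0) (k := Prod.snd) (v := fun p => p.1 + 1)
    (d := (PySem.Dict.empty : PySem.Dict Char Int))
    (by intro a _; simp [PySem.Dict.contains_empty])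
    (by rw [PySem.List.map_snd_enumerate]; decide)
  simpa [pvRank, PySem.Dict.empty] using h

theorem pvRank_get (c : Char) :
    pvRank.get? c = (PySem.List.index? pvChars c).map (fun i => (i : Int) + 1) := by
  have hkeys : pvRank.keys = pvChars := by
    show pvRank.items.map (·.1) = pvChars
    rw [pvRank_items, List.map_map]
    exact PySem.List.map_snd_enumerate pvChars 0
  have hnd : pvRank.keys.Nodup := by rw [hkeys]; decide
  by_cases hm : c ∈ pvChars
  · obtain ⟨k, hk⟩ := Option.isSome_iff_exists.mp
      ((PySem.List.index?_isSome_iff pvChars c).mpr hm)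
    obtain ⟨hlt, hget, -⟩ := PySem.List.getElem_of_index?_eq_some hk
    have hmem : (c, (k : Int) + 1) ∈ pvRank.items := by
      rw [pvRank_items]
      refine List.mem_map.mpr ⟨((k : Int), c), ?_, rfl⟩
      exact (PySem.List.mem_enumerate_iff pvChars 0 _).mpr ⟨k, hlt, by simp [hget]⟩
    rw [hk, PySem.Dict.get?_of_mem_items pvRank hmem hnd]
    simp
  · rw [(PySem.List.index?_eq_none_iff pvChars c).mpr hm]
    rw [(PySem.Dict.get?_eq_none_iff_not_mem_keys pvRank c).mpr (by rw [hkeys]; exact hm)]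
    simp

theorem pvLoopB_shift (cs : List Char) (acc : Int) :
    pvLoopB cs acc = (pvLoopB cs 0).map (fun v => acc * 53 ^ cs.length + v) := by
  induction cs generalizing acc with
  | nil => simp [pvLoopB]
  | cons c rest ih =>
    cases h : pvRank.get? c with
    | none => simp [pvLoopB, h]
    | some r =>
      simp only [pvLoopB, h]
      rw [ih (acc * 53 + r), ih (0 * 53 + r)]
      cases hb : pvLoopB rest 0 with
      | none => simp
      | some v => simp [List.length_cons, pow_succ]; ring

theorem pvLoop_agree (cs : List Char) (i : Nat) (out : Int) (h : i + cs.length ≤ 16) :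
    pvLoopA cs i out = (pvLoopB cs 0).map (fun v => out + v * 53 ^ (16 - i - cs.length)) := by
  induction cs generalizing i out with
  | nil => simp [pvLoopA, pvLoopB]
  | cons c rest ih =>
    by_cases hm : c ∈ pvChars
    · obtain ⟨k, hk⟩ := Option.isSome_iff_exists.mp
        ((PySem.List.index?_isSome_iff pvChars c).mpr hm)
      have hget : pvRank.get? c = some ((k : Int) + 1) := by
        rw [pvRank_get, hk]; simp
      have hrec : i + 1 + rest.length ≤ 16 := by
        simpa [Nat.add_comm, Nat.add_left_comm] using h
      simp only [pvLoopA, pvLoopB, if_pos hm, hk, hget, Option.getD_some]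
      rw [ih (i + 1) _ hrec, pvLoopB_shift rest ((0 : Int) * 53 + ((k : Int) + 1))]
      cases hb : pvLoopB rest 0 with
      | none => simp
      | some v =>
        simp only [Option.map_some]
        congr 1
        have e1 : 16 - i - 1 = (16 - (i + 1) - rest.length) + rest.length := by omega
        have e2 : 16 - i - (rest.length + 1) = 16 - (i + 1) - rest.length := by omega
        simp only [List.length_cons, e1, e2, pow_add]
        ring
    · have hg : pvRank.get? c = none := by
        rw [pvRank_get, (PySem.List.index?_eq_none_iff pvChars c).mpr hm]; rfl
      simp [pvLoopA, pvLoopB, if_neg hm, hg]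

-- ===== VERDICT (by name: the statement is the Claim_ definition above) =====
theorem alnumToInt_spec : Claim_equal_alnumToInt := by
  intro s _
  unfold Spec_alnumToInt alnumToInt alnumToInt_alt
  by_cases hlen : s.toList.length = 0 ∨ s.toList.length > 15
  · rw [if_pos hlen, if_neg (by omega)]
  · rw [if_neg hlen, if_pos (by omega)]
    rw [pvLoop_agree s.toList 0 0 (by omega)]
    cases hb : pvLoopB s.toList 0 with
    | none => simp
    | some v => simp
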